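-- pv_equiv track=rewrite | github.com/tb158/auction-assignment | assignment.py | make_sorted_priority_groups
-- ===== SOURCE A (Python) =====
-- def make_sorted_priority_groups(priorities):
--     """
--     優先順位リストからソート済みの優先順位グループを作成する関数
--     Parameters
--     ----------
--     priorities : list[int]
--         行または列の優先順位リスト
--     Returns
--     -------
--     sorted_priority_groups : list
--         (優先順位, インデックスリスト)のタプルのリスト（優先順位でソート済み）
--     """
--     priority_groups = {}
--     for idx, priority in enumerate(priorities):
--         if priority not in priority_groups:
--             priority_groups[priority] = []
--         priority_groups[priority].append(idx)
--
--     # 優先順位でソートしてタプルのリストとして返す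
--     sorted_priorities = sorted(priority_groups.keys())
--     sorted_priority_groups = [(priority, priority_groups[priority]) for priority in sorted_priorities]
--     return sorted_priority_groups
-- ===== SOURCE B (Python) =====
-- def make_sorted_priority_groups(priorities):
--     def build(rest):
--         if not rest:
--             return []
--         p = min(rest)
--         group = [i for i, q in enumerate(priorities) if q == p]
--         return [(p, group)] + build([q for q in rest if q != p])
--     return build(priorities)
-- ===== Notes on version B (the rewrite author's own statement) =====
-- stated objective: alternative
-- what changed: Replaced the dict-accumulation pass plus key sort by a selection recursion: repeatedly extract the minimum remaining priority, emit its index group by scanning enumerate(priorities), and recurse on the strictly larger priorities.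
import Mathlib
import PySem

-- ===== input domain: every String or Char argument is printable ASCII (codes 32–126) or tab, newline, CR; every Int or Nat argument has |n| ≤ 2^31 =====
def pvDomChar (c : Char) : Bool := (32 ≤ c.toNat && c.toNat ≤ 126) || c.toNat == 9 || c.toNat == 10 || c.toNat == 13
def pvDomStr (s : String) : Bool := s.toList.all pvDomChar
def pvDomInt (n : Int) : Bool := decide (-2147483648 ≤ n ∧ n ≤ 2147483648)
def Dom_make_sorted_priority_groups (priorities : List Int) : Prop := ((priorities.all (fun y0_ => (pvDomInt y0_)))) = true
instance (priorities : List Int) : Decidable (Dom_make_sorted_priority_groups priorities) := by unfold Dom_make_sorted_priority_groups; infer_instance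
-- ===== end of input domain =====

-- B replaces A's dict-accumulation + key-sort by a selection recursion (repeatedly take the
-- minimum remaining priority and emit its index group); alternative algorithm, not claimed faster.


-- ===== PORT A =====
def make_sorted_priority_groups (priorities : List Int) : List (Int × List Int) :=
  let priority_groups : PySem.Dict Int (List Int) :=
    (PySem.List.enumerate priorities).foldl
      (fun d ip =>
        -- if priority not in priority_groups: priority_groups[priority] = []
        let d := if d.contains ip.2 = false then d.insert ip.2 [] else d
        -- priority_groups[priority].append(idx); the key is present here, so the default [] is never used
        d.modify ip.2 [] (fun l => l ++ [ip.1]))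
      PySem.Dict.empty
  let sorted_priorities := PySem.List.sorted priority_groups.keys (fun k => k)
  -- priority_groups[priority]: the key comes from keys, so getD's default [] is never used
  sorted_priorities.map (fun p => (p, priority_groups.getD p []))

-- ===== PORT B =====
-- [i for i, q in enumerate(priorities) if q == p]
def pvGroup (priorities : List Int) (p : Int) : List Int :=
  ((PySem.List.enumerate priorities).filter (fun iq => iq.2 == p)).map (fun iq => iq.1)

def pvBuild (priorities : List Int) : List Int → List (Int × List Int)
  | [] => []
  | r :: rs =>
    -- p = min(rest); rest is non-empty here, so min? is some and the default 0 is never used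
    let p := (PySem.List.min? (r :: rs) (fun q => q)).getD 0
    (p, pvGroup priorities p) :: pvBuild priorities ((r :: rs).filter (fun q => decide (q ≠ p)))
  termination_by rest => rest.length
  decreasing_by
    have hm := PySem.List.min?_id_cons r rs
    have hmem := PySem.List.min?_mem hm
    have hp : (PySem.List.min? (r :: rs) (fun q => q)).getD 0 = List.foldl min r rs := by
      rw [hm]; rfl
    exact List.length_filter_lt_length_iff_exists.2 ⟨_, hmem, by simp [hp]⟩

def make_sorted_priority_groups_alt (priorities : List Int) : List (Int × List Int) :=
  pvBuild priorities priorities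

-- ===== PRECONDITION & SPEC =====
def Spec_make_sorted_priority_groups (priorities : List Int) (out : List (Int × List Int)) : Prop := out = make_sorted_priority_groups_alt priorities
instance (priorities : List Int) (out : List (Int × List Int)) : Decidable (Spec_make_sorted_priority_groups priorities out) := by unfold Spec_make_sorted_priority_groups; infer_instance

-- ===== CLAIM (what is proved, stated in full; the proofs are below) =====
def Claim_equal_make_sorted_priority_groups : Prop := ∀ (priorities : List Int), Dom_make_sorted_priority_groups priorities → Spec_make_sorted_priority_groups priorities (make_sorted_priority_groups priorities)

-- ===== LEMMAS AND PROOFS =====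

-- canonical form both ports are proved equal to
def pvCanon (priorities rest : List Int) : List (Int × List Int) :=
  (PySem.List.sorted (PySem.Set.ofList rest) (fun k => k)).map (fun p => (p, pvGroup priorities p))

lemma pv_step_eq (d : PySem.Dict Int (List Int)) (i p : Int) :
    (let d' := if d.contains p = false then d.insert p [] else d
     d'.modify p [] (fun l => l ++ [i])) = d.modify p [] (fun l => l ++ [i]) := by
  cases h : d.contains p with
  | true => simp
  | false =>
      simp [PySem.Dict.modify, PySem.Dict.getD_insert_self,
        PySem.Dict.insert_insert_self, PySem.Dict.getD_of_not_contains d ([] : List Int) h]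

lemma pv_dict_keys (xs : List Int) :
    ((PySem.List.enumerate xs).foldl
      (fun d ip =>
        let d := if d.contains ip.2 = false then d.insert ip.2 [] else d
        d.modify ip.2 [] (fun l => l ++ [ip.1]))
      PySem.Dict.empty).keys = PySem.Set.ofList xs := by
  have hstep : (fun (d : PySem.Dict Int (List Int)) (ip : Int × Int) =>
      let d := if d.contains ip.2 = false then d.insert ip.2 [] else d
      d.modify ip.2 [] (fun l => l ++ [ip.1]))
      = fun d ip => d.modify ip.2 [] (fun l => l ++ [ip.1]) :=
    funext fun d => funext fun ip => pv_step_eq d ip.1 ip.2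
  rw [hstep,
    PySem.Dict.keys_foldl_modify_key (PySem.List.enumerate xs) (fun ip => ip.2) []
      (fun _ ip => fun l => l ++ [ip.1]) PySem.Dict.empty,
    PySem.Dict.keys_empty, PySem.List.map_snd_enumerate, PySem.Set.update_nil_left]

lemma pv_dict_getD (xs : List Int) (p : Int) :
    ((PySem.List.enumerate xs).foldl
      (fun d ip =>
        let d := if d.contains ip.2 = false then d.insert ip.2 [] else d
        d.modify ip.2 [] (fun l => l ++ [ip.1]))
      PySem.Dict.empty).getD p [] = pvGroup xs p := by
  have hstep : (fun (d : PySem.Dict Int (List Int)) (ip : Int × Int) =>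
      let d := if d.contains ip.2 = false then d.insert ip.2 [] else d
      d.modify ip.2 [] (fun l => l ++ [ip.1]))
      = fun d ip => d.modify ip.2 [] (fun l => l ++ [ip.1]) :=
    funext fun d => funext fun ip => pv_step_eq d ip.1 ip.2
  rw [hstep]
  have hswap : List.foldl (fun (d : PySem.Dict Int (List Int)) (ip : Int × Int) => d.modify ip.2 [] (fun l => l ++ [ip.1]))
      PySem.Dict.empty (PySem.List.enumerate xs)
      = List.foldl (fun (d : PySem.Dict Int (List Int)) (q : Int × Int) => d.modify q.1 [] (fun l => l ++ [q.2]))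
      PySem.Dict.empty ((PySem.List.enumerate xs).map (fun ip => (ip.2, ip.1))) := by
    rw [List.foldl_map]
  rw [hswap, PySem.Dict.getD_foldl_modify_append]
  simp [pvGroup, PySem.Dict.getD_empty, List.filter_map, Function.comp_def]

lemma pv_A_canon (xs : List Int) : make_sorted_priority_groups xs = pvCanon xs xs := by
  simp only [make_sorted_priority_groups, pvCanon]
  rw [pv_dict_keys]
  exact List.map_congr_left (fun p _ => by rw [pv_dict_getD])

lemma pv_sorted_cons (rest : List Int) (p : Int)
    (hp : PySem.List.min? rest (fun q => q) = some p) :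
    PySem.List.sorted (PySem.Set.ofList rest) (fun k => k)
      = p :: PySem.List.sorted (PySem.Set.ofList (rest.filter (fun q => decide (q ≠ p)))) (fun k => k) := by
  have hpmem : p ∈ rest := PySem.List.min?_mem hp
  have hple : ∀ y ∈ rest, p ≤ y := PySem.List.min?_id_le hp
  have htail := PySem.List.sorted_ofList_pairwise_lt (rest.filter (fun q => decide (q ≠ p)))
  have hmem : ∀ x, x ∈ PySem.List.sorted
      (PySem.Set.ofList (rest.filter (fun q => decide (q ≠ p)))) (fun k => k) ↔ x ∈ rest ∧ x ≠ p := by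
    intro x
    rw [PySem.List.mem_sorted, PySem.Set.mem_ofList, List.mem_filter]
    simp
  apply PySem.List.sorted_eq_of_perm_of_pairwise_lt
  · rw [List.perm_ext_iff_of_nodup]
    · intro a
      rw [PySem.Set.mem_ofList, List.mem_cons, hmem]
      constructor
      · rintro (rfl | ⟨h1, _⟩) <;> assumption
      · intro ha
        by_cases hap : a = p
        · exact Or.inl hap
        · exact Or.inr ⟨ha, hap⟩
    · exact List.Pairwise.cons (fun x hx => ((hmem x).1 hx).2.symm)
        (htail.imp (fun h => ne_of_lt h))
    · exact PySem.Set.nodup_ofList rest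
  · exact List.Pairwise.cons
      (fun x hx => lt_of_le_of_ne (hple x ((hmem x).1 hx).1) (Ne.symm ((hmem x).1 hx).2))
      htail

lemma pv_B_canon (xs rest : List Int) : pvBuild xs rest = pvCanon xs rest := by
  induction rest using pvBuild.induct with
  | case1 => simp [pvBuild, pvCanon, PySem.List.sorted_eq_nil_iff]
  | case2 r rs p ih =>
      have hm := PySem.List.min?_id_cons r rs
      have hsome : PySem.List.min? (r :: rs) (fun q => q)
          = some ((PySem.List.min? (r :: rs) (fun q => q)).getD 0) := by rw [hm]; rfl
      rw [pvBuild, ih]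
      simp only [pvCanon]
      rw [pv_sorted_cons (r :: rs) _ hsome, List.map_cons]

-- ===== VERDICT (by name: the statement is the Claim_ definition above) =====
theorem make_sorted_priority_groups_spec : Claim_equal_make_sorted_priority_groups := by
  intro xs _
  show make_sorted_priority_groups xs = make_sorted_priority_groups_alt xs
  rw [pv_A_canon, make_sorted_priority_groups_alt, pv_B_canon]
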